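-- pv_equiv track=rewrite | github.com/nicolasBeucher/mamba-image | doc/mambaRT-pyref/createPythonRTRef.py | adaptAndtidyDesc
-- ===== SOURCE A (Python) =====
-- def adaptAndtidyDesc(desc):
--     # Will replace the line begining with a * by an itemize list
--     # will replace the example using a Python lstset
--     tidy_desc = ""
--     lines = desc.split('\n')
--
--     in_example = False
--     in_list = False
--
--     for l in lines:
--         ls = l.strip()
--         if in_example:
--             if ls=='':
--                 tidy_desc += "\\end{lstlisting}\n\n"
--                 in_example = False
--             else:
--                 tidy_desc += ls.replace("\\_","_") + '\n'
--         elif in_list: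
--             if ls.find("*")==0:
--                 tidy_desc += "\\item "+ls[1:].strip()+"\n"
--             else:
--                 tidy_desc += "\\end{itemize}\n\n"+ls+"\n"
--                 in_list = False
--         elif ls.find("*")==0:
--             tidy_desc += "\\begin{itemize}\n"
--             tidy_desc += "\\item "+ls[1:].strip()+"\n"
--             in_list = True
--         elif ls.find(">>>")==0:
--             tidy_desc += "\\lstset{language=Python}\n\\begin{lstlisting}\n"
--             tidy_desc += ls.replace("\\_","_") + '\n'
--             in_example = True
--         else:
--             tidy_desc += ls + '\n'
--
--     # Last line was in an example
--     if in_example: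
--         tidy_desc += "\\end{lstlisting}\n\n"
--
--     return tidy_desc
-- ===== SOURCE B (Python) =====
-- def adaptAndtidyDesc(desc):
--     # Index-based scanner: consume each itemize/lstlisting block with a nested loop
--     lines = desc.split('\n')
--     out = []
--     i = 0
--     n = len(lines)
--     while i < n:
--         ls = lines[i].strip()
--         if ls.startswith('*'):
--             out.append("\\begin{itemize}\n")
--             while i < n and lines[i].strip().startswith('*'):
--                 out.append("\\item " + lines[i].strip()[1:].strip() + "\n")
--                 i += 1
--             if i < n:
--                 out.append("\\end{itemize}\n\n" + lines[i].strip() + "\n")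
--                 i += 1
--         elif ls.startswith('>>>'):
--             out.append("\\lstset{language=Python}\n\\begin{lstlisting}\n")
--             out.append(ls.replace("\\_", "_") + "\n")
--             i += 1
--             while i < n and lines[i].strip() != '':
--                 out.append(lines[i].strip().replace("\\_", "_") + "\n")
--                 i += 1
--             out.append("\\end{lstlisting}\n\n")
--             i += 1  # skip the blank terminator (or move past end-of-input)
--         else:
--             out.append(ls + "\n")
--             i += 1
--     return ''.join(out)
-- ===== Notes on version B (the rewrite author's own statement) =====
-- stated objective: alternative
-- what changed: Replaces A's single pass driven by in_example/in_list boolean flags with an index-based scanner whose nested inner loops consume each itemize/lstlisting block whole, eliminating the state flags.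
import Mathlib
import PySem

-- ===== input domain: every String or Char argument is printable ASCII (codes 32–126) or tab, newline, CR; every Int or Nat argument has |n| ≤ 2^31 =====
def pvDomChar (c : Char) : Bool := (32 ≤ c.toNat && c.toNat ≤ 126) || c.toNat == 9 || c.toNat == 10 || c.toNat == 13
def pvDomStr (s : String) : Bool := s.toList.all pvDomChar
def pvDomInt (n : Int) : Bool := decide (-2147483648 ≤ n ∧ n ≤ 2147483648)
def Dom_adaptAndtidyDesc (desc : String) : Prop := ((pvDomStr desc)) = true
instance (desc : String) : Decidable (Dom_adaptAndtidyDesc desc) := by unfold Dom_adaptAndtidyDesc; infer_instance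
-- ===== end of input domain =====

-- B replaces A's in_example/in_list flag machine by an index scanner that consumes each
-- itemize/lstlisting block in a nested loop (alternative decomposition, same cost).

-- ===== PORT A =====
-- state = (tidy_desc, in_example, in_list)
def pvAStep (st : String × Bool × Bool) (l : String) : String × Bool × Bool :=
  let ls := PySem.Str.strip l
  if st.2.1 then
    if ls = "" then (st.1 ++ "\\end{lstlisting}\n\n", false, st.2.2)
    else (st.1 ++ PySem.Str.replace ls "\\_" "_" ++ "\n", st.2.1, st.2.2)
  else if st.2.2 then
    if PySem.Str.find ls "*" = 0 then
      (st.1 ++ "\\item " ++ PySem.Str.strip (PySem.Str.slice ls (some 1) none) ++ "\n", st.2.1, st.2.2)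
    else (st.1 ++ "\\end{itemize}\n\n" ++ ls ++ "\n", st.2.1, false)
  else if PySem.Str.find ls "*" = 0 then
    (st.1 ++ "\\begin{itemize}\n" ++ "\\item " ++ PySem.Str.strip (PySem.Str.slice ls (some 1) none) ++ "\n", st.2.1, true)
  else if PySem.Str.find ls ">>>" = 0 then
    (st.1 ++ "\\lstset{language=Python}\n\\begin{lstlisting}\n" ++ PySem.Str.replace ls "\\_" "_" ++ "\n", true, st.2.2)
  else (st.1 ++ ls ++ "\n", st.2.1, st.2.2)

def adaptAndtidyDesc (desc : String) : String :=
  let lines := (PySem.Str.split? desc "\n").getD []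
  let st := lines.foldl pvAStep ("", false, false)
  if st.2.1 then st.1 ++ "\\end{lstlisting}\n\n" else st.1

-- ===== PORT B =====
-- inner loop: consecutive '*'-lines; emits the items, then (unless input ends) the
-- closing line; returns the emitted text and the unconsumed suffix
def pvBItems : List String → String × List String
  | [] => ("", [])
  | l :: rest =>
    let ls := PySem.Str.strip l
    if PySem.Str.startswith ls "*" then
      let p := pvBItems rest
      ("\\item " ++ PySem.Str.strip (PySem.Str.slice ls (some 1) none) ++ "\n" ++ p.1, p.2)
    else ("\\end{itemize}\n\n" ++ ls ++ "\n", rest)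

-- inner loop: example lines until a blank line or end of input; the blank terminator is consumed
def pvBEx : List String → String × List String
  | [] => ("\\end{lstlisting}\n\n", [])
  | l :: rest =>
    let ls := PySem.Str.strip l
    if ls = "" then ("\\end{lstlisting}\n\n", rest)
    else
      let p := pvBEx rest
      (PySem.Str.replace ls "\\_" "_" ++ "\n" ++ p.1, p.2)

-- (termination facts for the outer loop)
theorem pvBItems_len (xs : List String) : (pvBItems xs).2.length ≤ xs.length := by
  induction xs with
  | nil => simp [pvBItems]
  | cons l rest ih =>
    simp only [pvBItems]
    split
    · simpa using Nat.le_succ_of_le ih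
    · simp

theorem pvBEx_len (xs : List String) : (pvBEx xs).2.length ≤ xs.length := by
  induction xs with
  | nil => simp [pvBEx]
  | cons l rest ih =>
    simp only [pvBEx]
    split
    · simp
    · simpa using Nat.le_succ_of_le ih

-- outer loop over the line index
def pvBGo : List String → String
  | [] => ""
  | l :: rest =>
    let ls := PySem.Str.strip l
    if h : PySem.Str.startswith ls "*" then
      let p := pvBItems (l :: rest)
      "\\begin{itemize}\n" ++ p.1 ++ pvBGo p.2
    else if PySem.Str.startswith ls ">>>" then
      let p := pvBEx rest
      "\\lstset{language=Python}\n\\begin{lstlisting}\n" ++ PySem.Str.replace ls "\\_" "_" ++ "\n" ++ p.1 ++ pvBGo p.2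
    else ls ++ "\n" ++ pvBGo rest
termination_by xs => xs.length
decreasing_by
  · have h' : PySem.Str.startswith (PySem.Str.strip l) "*" = true := h
    have hh : (pvBItems (l :: rest)).2 = (pvBItems rest).2 := by
      simp only [pvBItems, h', if_true]
    simp only [hh]
    exact Nat.lt_succ_of_le (pvBItems_len rest)
  · exact Nat.lt_succ_of_le (pvBEx_len rest)
  · simp

def adaptAndtidyDesc_alt (desc : String) : String :=
  pvBGo ((PySem.Str.split? desc "\n").getD [])

-- ===== PRECONDITION & SPEC =====
def Spec_adaptAndtidyDesc (desc : String) (out : String) : Prop := out = adaptAndtidyDesc_alt desc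
instance (desc : String) (out : String) : Decidable (Spec_adaptAndtidyDesc desc out) := by unfold Spec_adaptAndtidyDesc; infer_instance

-- ===== CLAIM (what is proved, stated in full; the proofs are below) =====
def Claim_equal_adaptAndtidyDesc : Prop := ∀ (desc : String), Dom_adaptAndtidyDesc desc → Spec_adaptAndtidyDesc desc (adaptAndtidyDesc desc)

-- ===== LEMMAS AND PROOFS =====

theorem pv_find_zero_iff (s p : String) :
    PySem.Str.find s p = 0 ↔ PySem.Str.startswith s p = true := by
  rw [PySem.Str.find_eq, PySem.Str.startswith_eq, PySem.Chars.startswith_iff]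
  constructor
  · intro h
    have h0 : (0:Int) ≤ PySem.Chars.find s.toList p.toList := by rw [h]
    have := (PySem.Chars.find_spec h0).1
    rw [h] at this
    simpa using this
  · intro hp
    have h0 : (0:Int) ≤ PySem.Chars.find s.toList p.toList :=
      (PySem.Chars.find_nonneg_iff ..).mpr hp.isInfix
    by_contra hne
    have hpos : 0 < (PySem.Chars.find s.toList p.toList).toNat := by omega
    have := (PySem.Chars.find_spec h0).2 0 hpos
    simp at this
    exact this hp

-- final flush of A's fold state
def pvFlush (st : String × Bool × Bool) : String :=
  if st.2.1 then st.1 ++ "\\end{lstlisting}\n\n" else st.1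

theorem pv_key (n : Nat) : ∀ xs : List String, xs.length ≤ n →
    (∀ acc, pvFlush (xs.foldl pvAStep (acc, false, false)) = acc ++ pvBGo xs)
  ∧ (∀ acc, pvFlush (xs.foldl pvAStep (acc, true, false)) = acc ++ (pvBEx xs).1 ++ pvBGo (pvBEx xs).2)
  ∧ (∀ acc, pvFlush (xs.foldl pvAStep (acc, false, true)) = acc ++ (pvBItems xs).1 ++ pvBGo (pvBItems xs).2) := by
  induction n with
  | zero =>
    intro xs hlen
    have hxs : xs = [] := List.eq_nil_of_length_eq_zero (Nat.le_zero.mp hlen)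
    subst hxs
    refine ⟨fun acc => ?_, fun acc => ?_, fun acc => ?_⟩ <;>
      simp [pvFlush, pvBGo, pvBEx, pvBItems]
  | succ n ih =>
    intro xs hlen
    cases xs with
    | nil =>
      refine ⟨fun acc => ?_, fun acc => ?_, fun acc => ?_⟩ <;>
        simp [pvFlush, pvBGo, pvBEx, pvBItems]
    | cons l rest =>
      have hr : rest.length ≤ n := by simpa using Nat.le_of_succ_le_succ hlen
      obtain ⟨ih1, ih2, ih3⟩ := ih rest hr
      refine ⟨fun acc => ?_, fun acc => ?_, fun acc => ?_⟩
      · -- normal state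
        by_cases hstar : PySem.Str.find (PySem.Str.strip l) "*" = 0
        · have hs : PySem.Str.startswith (PySem.Str.strip l) "*" = true :=
            (pv_find_zero_iff _ _).mp hstar
          simp only [List.foldl_cons, pvAStep, Bool.false_eq_true, if_false, if_pos hstar]
          rw [ih3]
          have hB : pvBItems (l :: rest) =
              ("\\item " ++ PySem.Str.strip (PySem.Str.slice (PySem.Str.strip l) (some 1)) ++ "\n" ++ (pvBItems rest).1,
               (pvBItems rest).2) := by
            simp only [pvBItems, hs, if_true]
          have hG : pvBGo (l :: rest)
              = "\\begin{itemize}\n" ++ (pvBItems (l :: rest)).1 ++ pvBGo ((pvBItems (l :: rest)).2) := by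
            rw [pvBGo]; simp only [hs, dite_true]
          rw [hG, hB]
          simp only [String.append_assoc]
        · have hs' : PySem.Str.startswith (PySem.Str.strip l) "*" = false :=
            eq_false_of_ne_true (fun hh => hstar ((pv_find_zero_iff _ _).mpr hh))
          by_cases hgt : PySem.Str.find (PySem.Str.strip l) ">>>" = 0
          · have hg : PySem.Str.startswith (PySem.Str.strip l) ">>>" = true :=
              (pv_find_zero_iff _ _).mp hgt
            simp only [List.foldl_cons, pvAStep, Bool.false_eq_true, if_false,
              if_neg hstar, if_pos hgt]
            rw [ih2]
            have hG : pvBGo (l :: rest)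
                = "\\lstset{language=Python}\n\\begin{lstlisting}\n"
                  ++ PySem.Str.replace (PySem.Str.strip l) "\\_" "_" ++ "\n"
                  ++ (pvBEx rest).1 ++ pvBGo ((pvBEx rest).2) := by
              rw [pvBGo]; simp only [hs', hg, Bool.false_eq_true, dite_false, if_true]
            rw [hG]
            simp only [String.append_assoc]
          · have hg' : PySem.Str.startswith (PySem.Str.strip l) ">>>" = false :=
              eq_false_of_ne_true (fun hh => hgt ((pv_find_zero_iff _ _).mpr hh))
            simp only [List.foldl_cons, pvAStep, Bool.false_eq_true, if_false,
              if_neg hstar, if_neg hgt]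
            rw [ih1]
            have hG : pvBGo (l :: rest) = PySem.Str.strip l ++ "\n" ++ pvBGo rest := by
              rw [pvBGo]; simp only [hs', hg', Bool.false_eq_true, dite_false, if_false]
            rw [hG]
            simp only [String.append_assoc]
      · -- in_example state
        by_cases hb : PySem.Str.strip l = ""
        · simp only [List.foldl_cons, pvAStep, eq_self_iff_true, if_true, if_pos hb]
          rw [ih1]
          have hE : pvBEx (l :: rest) = ("\\end{lstlisting}\n\n", rest) := by
            simp only [pvBEx, hb, eq_self_iff_true, if_true]
          rw [hE]
        · simp only [List.foldl_cons, pvAStep, eq_self_iff_true, if_true, if_neg hb]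
          rw [ih2]
          have hE : pvBEx (l :: rest)
              = (PySem.Str.replace (PySem.Str.strip l) "\\_" "_" ++ "\n" ++ (pvBEx rest).1,
                 (pvBEx rest).2) := by
            simp only [pvBEx, hb, if_neg, if_false]
          rw [hE]
          simp only [String.append_assoc]
      · -- in_list state
        by_cases hstar : PySem.Str.find (PySem.Str.strip l) "*" = 0
        · have hs : PySem.Str.startswith (PySem.Str.strip l) "*" = true :=
            (pv_find_zero_iff _ _).mp hstar
          simp only [List.foldl_cons, pvAStep, Bool.false_eq_true, if_false,
            eq_self_iff_true, if_true, if_pos hstar]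
          rw [ih3]
          have hB : pvBItems (l :: rest) =
              ("\\item " ++ PySem.Str.strip (PySem.Str.slice (PySem.Str.strip l) (some 1)) ++ "\n" ++ (pvBItems rest).1,
               (pvBItems rest).2) := by
            simp only [pvBItems, hs, if_true]
          rw [hB]
          simp only [String.append_assoc]
        · have hs' : PySem.Str.startswith (PySem.Str.strip l) "*" = false :=
            eq_false_of_ne_true (fun hh => hstar ((pv_find_zero_iff _ _).mpr hh))
          simp only [List.foldl_cons, pvAStep, Bool.false_eq_true, if_false,
            eq_self_iff_true, if_true, if_neg hstar]
          rw [ih1]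
          have hB : pvBItems (l :: rest)
              = ("\\end{itemize}\n\n" ++ PySem.Str.strip l ++ "\n", rest) := by
            simp only [pvBItems, hs', Bool.false_eq_true, if_false]
          rw [hB]
          simp only [String.append_assoc]

-- ===== VERDICT =====
theorem adaptAndtidyDesc_spec : Claim_equal_adaptAndtidyDesc := by
  intro desc _
  unfold Spec_adaptAndtidyDesc adaptAndtidyDesc adaptAndtidyDesc_alt
  have h := (pv_key ((PySem.Str.split? desc "\n").getD []).length
      ((PySem.Str.split? desc "\n").getD []) le_rfl).1 ""
  simpa [pvFlush] using h
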